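-- pv_equiv track=rewrite | github.com/wx83/REGen | retriever/inference_video.py | _find_consecutive_intervals
-- ===== SOURCE A (Python) =====
-- def _find_consecutive_intervals(indices: list) -> list:
--     if not indices:
--         return []
--     intervals, start = [], indices[0]
--     for i in range(1, len(indices)):
--         if indices[i] != indices[i - 1] + 1:
--             intervals.append([start, indices[i - 1]])
--             start = indices[i]
--     intervals.append([start, indices[-1]])
--     return intervals
-- ===== SOURCE B (Python) =====
-- def _find_consecutive_intervals(indices: list) -> list:
--     n = len(indices)
--     if n == 0:
--         return []
--     breaks = [0] + [i for i in range(1, n) if indices[i] != indices[i - 1] + 1] + [n]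
--     return [[indices[a], indices[b - 1]] for a, b in zip(breaks, breaks[1:])]
-- ===== Notes on version B (the rewrite author's own statement) =====
-- stated objective: idiomatic
-- what changed: Replaces the single-pass running-start accumulator loop by a two-pass break-position strategy: a comprehension collects the indices where the consecutive run breaks, then adjacent break pairs are mapped to [start, end] intervals.
import Mathlib
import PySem

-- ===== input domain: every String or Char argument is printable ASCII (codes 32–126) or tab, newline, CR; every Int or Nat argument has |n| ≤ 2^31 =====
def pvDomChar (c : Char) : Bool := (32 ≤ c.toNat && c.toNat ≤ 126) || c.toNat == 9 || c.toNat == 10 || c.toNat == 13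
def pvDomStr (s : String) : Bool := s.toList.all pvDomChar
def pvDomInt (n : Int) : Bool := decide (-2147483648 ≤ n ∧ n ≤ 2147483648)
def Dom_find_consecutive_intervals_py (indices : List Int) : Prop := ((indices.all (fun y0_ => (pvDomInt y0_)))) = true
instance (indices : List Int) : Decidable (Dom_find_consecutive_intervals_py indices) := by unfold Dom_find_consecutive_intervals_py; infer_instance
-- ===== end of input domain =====

-- B replaces A's running-start accumulator loop by two passes — collect the break
-- positions, then map adjacent break pairs to [start, end] intervals (idiomatic).

-- ===== PORT A =====
def find_consecutive_intervals_py (indices : List Int) : List (List Int) :=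
  if indices = [] then []
  else
    let st := (PySem.List.pyRange 1 (indices.length : Int)).foldl
      (fun (acc : List (List Int) × Int) i =>
        if PySem.List.pyGetD indices i 0 ≠ PySem.List.pyGetD indices (i - 1) 0 + 1 then
          (acc.1 ++ [[acc.2, PySem.List.pyGetD indices (i - 1) 0]], PySem.List.pyGetD indices i 0)
        else acc)
      ([], PySem.List.pyGetD indices 0 0)
    st.1 ++ [[st.2, PySem.List.pyGetD indices (-1) 0]]

-- ===== PORT B =====
def find_consecutive_intervals_py_alt (indices : List Int) : List (List Int) :=
  let n : Int := indices.length
  if n = 0 then []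
  else
    let breaks : List Int :=
      [0] ++ (PySem.List.pyRange 1 n).filter
        (fun i => PySem.List.pyGetD indices i 0 != PySem.List.pyGetD indices (i - 1) 0 + 1) ++ [n]
    (breaks.zip (PySem.List.slice breaks (some 1) none)).map
      (fun ab => [PySem.List.pyGetD indices ab.1 0, PySem.List.pyGetD indices (ab.2 - 1) 0])

-- ===== PRECONDITION & SPEC =====
def Spec_find_consecutive_intervals_py (indices : List Int) (out : List (List Int)) : Prop := out = find_consecutive_intervals_py_alt indices
instance (indices : List Int) (out : List (List Int)) : Decidable (Spec_find_consecutive_intervals_py indices out) := by unfold Spec_find_consecutive_intervals_py; infer_instance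

-- ===== CLAIM (what is proved, stated in full; the proofs are below) =====
def Claim_equal_find_consecutive_intervals_py : Prop := ∀ (indices : List Int), Dom_find_consecutive_intervals_py indices → Spec_find_consecutive_intervals_py indices (find_consecutive_intervals_py indices)

-- ===== LEMMAS AND PROOFS =====

-- zipping a nonempty list with its tail, after appending one element
theorem zip_tail_append {α : Type} (l : List α) (x d : α) (h : l ≠ []) :
    (l ++ [x]).zip ((l ++ [x]).drop 1) = l.zip (l.drop 1) ++ [(l.getLastD d, x)] := by
  induction l with
  | nil => exact absurd rfl h
  | cons a t ih =>
    cases t with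
    | nil => simp
    | cons b t' =>
      have := ih (by simp)
      simp only [List.cons_append, List.drop_one, List.tail_cons, List.zip_cons_cons] at *
      simp [this, List.getLastD]

-- the loop invariant: after processing range(1, k), A's state is
-- (intervals of the breaks found so far, indices[last break])
theorem fold_invariant (indices : List Int) (k : Nat) :
    (PySem.List.pyRange 1 (k : Int)).foldl
      (fun (acc : List (List Int) × Int) i =>
        if PySem.List.pyGetD indices i 0 ≠ PySem.List.pyGetD indices (i - 1) 0 + 1 then
          (acc.1 ++ [[acc.2, PySem.List.pyGetD indices (i - 1) 0]], PySem.List.pyGetD indices i 0)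
        else acc)
      ([], PySem.List.pyGetD indices 0 0)
    =
    (let brks : List Int := 0 :: (PySem.List.pyRange 1 (k : Int)).filter
        (fun i => PySem.List.pyGetD indices i 0 != PySem.List.pyGetD indices (i - 1) 0 + 1)
     ((brks.zip (brks.drop 1)).map
        (fun ab => [PySem.List.pyGetD indices ab.1 0, PySem.List.pyGetD indices (ab.2 - 1) 0]),
      PySem.List.pyGetD indices (brks.getLastD 0) 0)) := by
  induction k with
  | zero => simp [PySem.List.pyRange]
  | succ k ih =>
    rcases Nat.eq_zero_or_pos k with hk | hk
    · subst hk; simp [PySem.List.pyRange]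
    · have hcast : ((k + 1 : Nat) : Int) = (k : Int) + 1 := by push_cast; ring
      have hrange : PySem.List.pyRange 1 ((k + 1 : Nat) : Int)
          = PySem.List.pyRange 1 (k : Int) ++ [(k : Int)] := by
        rw [hcast, PySem.List.pyRange_one_succ_right (by exact_mod_cast hk)]
      rw [hrange]
      simp only [List.foldl_append, List.filter_append, ih, List.foldl_cons, List.foldl_nil]
      by_cases hp : PySem.List.pyGetD indices (k : Int) 0
          ≠ PySem.List.pyGetD indices ((k : Int) - 1) 0 + 1
      · have hb : (PySem.List.pyGetD indices (k : Int) 0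
            != PySem.List.pyGetD indices ((k : Int) - 1) 0 + 1) = true := by
          simpa [bne_iff_ne] using hp
        rw [if_pos hp]
        simp only [List.filter_cons, List.filter_nil, hb, if_true]
        set brks : List Int := 0 :: (PySem.List.pyRange 1 (k : Int)).filter
          (fun i => PySem.List.pyGetD indices i 0 != PySem.List.pyGetD indices (i - 1) 0 + 1)
          with hbrks
        have hne : brks ≠ [] := by simp [hbrks]
        have hzip := zip_tail_append brks ((k : Int)) 0 hne
        rw [show (0 :: ((PySem.List.pyRange 1 (k:Int)).filter
              (fun i => PySem.List.pyGetD indices i 0 != PySem.List.pyGetD indices (i - 1) 0 + 1)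
              ++ [(k:Int)])) = brks ++ [(k:Int)] by simp [hbrks]]
        rw [hzip]
        simp
      · have hb : (PySem.List.pyGetD indices (k : Int) 0
            != PySem.List.pyGetD indices ((k : Int) - 1) 0 + 1) = false := by
          simpa [bne_iff_ne] using hp
        rw [if_neg hp]
        simp only [List.filter_cons, List.filter_nil, hb, Bool.false_eq_true, if_false,
          List.append_nil]

-- ===== VERDICT (by name: the statement is the Claim_ definition above) =====
theorem find_consecutive_intervals_py_spec : Claim_equal_find_consecutive_intervals_py := by
  intro indices _
  show find_consecutive_intervals_py indices = find_consecutive_intervals_py_alt indices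
  by_cases hnil : indices = []
  · subst hnil; rfl
  · have hlen : 1 ≤ indices.length := by
      cases indices with
      | nil => exact absurd rfl hnil
      | cons a t => simp
    unfold find_consecutive_intervals_py find_consecutive_intervals_py_alt
    simp only [hnil, if_false]
    have hn0 : ¬ ((indices.length : Int) = 0) := by
      simp [List.length_eq_zero_iff]; exact hnil
    simp only [hn0, if_false]
    rw [fold_invariant indices indices.length]
    set brks : List Int := 0 :: (PySem.List.pyRange 1 (indices.length : Int)).filter
      (fun i => PySem.List.pyGetD indices i 0 != PySem.List.pyGetD indices (i - 1) 0 + 1)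
      with hbrks
    have hne : brks ≠ [] := by simp [hbrks]
    have hslice : PySem.List.slice
        (([0] : List Int) ++ (PySem.List.pyRange 1 (indices.length : Int)).filter
          (fun i => PySem.List.pyGetD indices i 0 != PySem.List.pyGetD indices (i - 1) 0 + 1)
          ++ [(indices.length : Int)]) (some 1) none
        = (brks ++ [(indices.length : Int)]).drop 1 := by
      rw [PySem.List.slice_from _ (by norm_num)]
      simp [hbrks]
    have hlist : (([0] : List Int) ++ (PySem.List.pyRange 1 (indices.length : Int)).filter
          (fun i => PySem.List.pyGetD indices i 0 != PySem.List.pyGetD indices (i - 1) 0 + 1)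
          ++ [(indices.length : Int)]) = brks ++ [(indices.length : Int)] := by
      simp [hbrks]
    rw [hslice, hlist, zip_tail_append brks ((indices.length : Int)) 0 hne]
    simp only [List.map_append, List.map_cons, List.map_nil]
    have hlast : PySem.List.pyGetD indices (-1) 0
        = PySem.List.pyGetD indices ((indices.length : Int) - 1) 0 := by
      rw [PySem.List.pyGetD_neg_one indices 0 hnil,
          PySem.List.pyGetD_eq_getElem indices 0 (by omega) (by omega)]
      rw [List.getLast_eq_getElem]
      congr 1
      omega
    rw [hlast]
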